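-- pv_equiv track=rewrite | github.com/D2KLab/reclab | reclab/evaluator.py | _reference_sorted
-- ===== SOURCE A (Python) =====
-- def _reference_sorted(test_set, threshold):
--     reference = {}
--
--     for i, rating in enumerate(test_set):
--         user = rating[0]
--
--         if user not in reference:
--             reference[user] = []
--
--         reference[user].append([rating[1], rating[2]])
--
--     for user in reference:
--         reference[user].sort(key=lambda x: x[1], reverse=True)
--         reference[user] = list(filter(lambda x: x[1] > threshold, reference[user]))
--         reference[user] = list(map(lambda x: x[0], reference[user]))
--
--     return reference
-- ===== SOURCE B (Python) =====
-- def _reference_sorted(test_set, threshold):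
--     reference = {rating[0]: [] for rating in test_set}
--     for user, item, value in sorted(test_set, key=lambda rating: rating[2], reverse=True):
--         if value > threshold:
--             reference[user].append(item)
--     return reference
-- ===== Notes on version B (the rewrite author's own statement) =====
-- stated objective: simpler
-- what changed: Instead of grouping ratings into per-user lists and then sorting, filtering and projecting each user's list, B pre-registers every user with an empty list, stably sorts the whole test set once descending by rating value, and makes one pass over the globally sorted sequence appending each item to its user's list when its rating exceeds the threshold.
import Mathlib
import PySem

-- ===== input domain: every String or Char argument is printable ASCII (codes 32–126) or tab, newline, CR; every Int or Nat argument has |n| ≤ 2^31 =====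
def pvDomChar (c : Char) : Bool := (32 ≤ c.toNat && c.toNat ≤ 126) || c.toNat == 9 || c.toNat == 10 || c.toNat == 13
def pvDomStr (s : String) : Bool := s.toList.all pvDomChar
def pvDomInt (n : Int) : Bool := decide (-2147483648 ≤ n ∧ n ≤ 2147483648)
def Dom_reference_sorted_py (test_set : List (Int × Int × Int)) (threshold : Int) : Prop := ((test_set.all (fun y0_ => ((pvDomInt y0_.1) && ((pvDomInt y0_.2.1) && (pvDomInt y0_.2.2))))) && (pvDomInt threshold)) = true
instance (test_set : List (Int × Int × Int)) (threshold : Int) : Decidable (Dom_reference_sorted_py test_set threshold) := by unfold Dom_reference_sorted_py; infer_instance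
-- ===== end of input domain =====

-- B replaces A's group-then-sort-each-user with one pre-registration pass plus one global
-- stable sort and a single filtered append pass; objective: simpler (same asymptotic cost).

-- ===== PORT A =====
def reference_sorted_py (test_set : List (Int × Int × Int)) (threshold : Int) : List (Int × List Int) :=
  -- reference = {}; for i, rating in enumerate(test_set): group [rating[1], rating[2]] under rating[0]
  let reference : PySem.Dict Int (List (Int × Int)) :=
    test_set.foldl (fun d rating =>
      let user := rating.1
      let d := if d.contains user then d else d.insert user []
      d.modify user [] (fun l => l ++ [(rating.2.1, rating.2.2)])) PySem.Dict.empty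
  -- for user in reference: sort desc by x[1], keep x[1] > threshold, map x[0]
  reference.items.map (fun p =>
    (p.1, ((PySem.List.sorted p.2 (fun x => x.2) true).filter
             (fun x => decide (threshold < x.2))).map (fun x => x.1)))

-- ===== PORT B =====
def reference_sorted_py_alt (test_set : List (Int × Int × Int)) (threshold : Int) : List (Int × List Int) :=
  -- reference = {rating[0]: [] for rating in test_set}
  let reference : PySem.Dict Int (List Int) :=
    test_set.foldl (fun d rating => d.insert rating.1 []) PySem.Dict.empty
  -- for user, item, value in sorted(test_set, key=lambda r: r[2], reverse=True): if value > threshold: append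
  let reference :=
    (PySem.List.sorted test_set (fun rating => rating.2.2) true).foldl
      (fun d r => if threshold < r.2.2 then d.modify r.1 [] (fun l => l ++ [r.2.1]) else d)
      reference
  reference.items

-- ===== PRECONDITION & SPEC =====
def Spec_reference_sorted_py (test_set : List (Int × Int × Int)) (threshold : Int) (out : List (Int × List Int)) : Prop := out = reference_sorted_py_alt test_set threshold
instance (test_set : List (Int × Int × Int)) (threshold : Int) (out : List (Int × List Int)) : Decidable (Spec_reference_sorted_py test_set threshold out) := by unfold Spec_reference_sorted_py; infer_instance

-- ===== CLAIM (what is proved, stated in full; the proofs are below) =====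
def Claim_equal_reference_sorted_py : Prop := ∀ (test_set : List (Int × Int × Int)) (threshold : Int), Dom_reference_sorted_py test_set threshold → Spec_reference_sorted_py test_set threshold (reference_sorted_py test_set threshold)

-- ===== LEMMAS AND PROOFS =====

theorem pv_insertBy_head {α : Type} (key : α → Int) (x : α) (ys : List α)
    (h : ∀ z ∈ ys, key z < key x) :
    PySem.List.insertBy (fun a c => decide (key c < key a)) x ys = x :: ys := by
  cases ys with
  | nil => rfl
  | cons y t =>
    simp [PySem.List.insertBy, h y (by simp)]

theorem pv_insertBy_pairwise {α : Type} (key : α → Int) (x : α) (ys : List α)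
    (h : ys.Pairwise (fun a c => key c ≤ key a)) :
    (PySem.List.insertBy (fun a c => decide (key c < key a)) x ys).Pairwise
      (fun a c => key c ≤ key a) := by
  induction ys with
  | nil => simp [PySem.List.insertBy]
  | cons y t ih =>
    rcases List.pairwise_cons.mp h with ⟨hy, ht⟩
    by_cases hb : key y < key x
    · simp only [PySem.List.insertBy, hb, decide_true, if_pos]
      refine List.pairwise_cons.mpr ⟨?_, h⟩
      intro z hz
      rcases List.mem_cons.mp hz with hz | hz
      · subst hz; omega
      · exact le_trans (hy z hz) (le_of_lt hb)
    · simp only [PySem.List.insertBy, hb, decide_false, if_neg, Bool.false_eq_true, not_false_iff]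
      refine List.pairwise_cons.mpr ⟨?_, ih ht⟩
      intro z hz
      rcases (PySem.List.mem_insertBy _ _ _ _).mp hz with hz | hz
      · subst hz; omega
      · exact hy z hz

theorem pv_filter_insertBy {α : Type} (key : α → Int) (p : α → Bool) (x : α) (ys : List α)
    (h : ys.Pairwise (fun a c => key c ≤ key a)) :
    (PySem.List.insertBy (fun a c => decide (key c < key a)) x ys).filter p =
      if p x then PySem.List.insertBy (fun a c => decide (key c < key a)) x (ys.filter p)
      else ys.filter p := by
  induction ys with
  | nil => cases hp : p x <;> simp [PySem.List.insertBy, List.filter, hp]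
  | cons y t ih =>
    rcases List.pairwise_cons.mp h with ⟨hy, ht⟩
    by_cases hb : key y < key x
    · simp only [PySem.List.insertBy, hb, decide_true, if_pos]
      cases hp : p x with
      | true =>
        have hall : ∀ z ∈ (y :: t).filter p, key z < key x := by
          intro z hz
          have hz' := List.mem_of_mem_filter hz
          rcases List.mem_cons.mp hz' with hz' | hz'
          · subst hz'; exact hb
          · exact lt_of_le_of_lt (hy z hz') hb
        rw [pv_insertBy_head key x _ hall]
        simp [List.filter, hp]
      | false =>
        simp [List.filter, hp]
    · simp only [PySem.List.insertBy, hb, decide_false, if_neg, Bool.false_eq_true, not_false_iff]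
      cases hp : p x with
      | true =>
        cases hpy : p y with
        | true =>
          simp only [List.filter, hpy, if_pos]
          rw [ih ht]
          simp [hp, PySem.List.insertBy, hb]
        | false =>
          simp only [List.filter, hpy]
          rw [ih ht]
          simp [hp]
      | false =>
        cases hpy : p y <;> simp [List.filter, hpy, hp, ih ht]

theorem pv_filter_foldl_insertBy {α : Type} (key : α → Int) (p : α → Bool) (l : List α)
    (acc : List α) (h : acc.Pairwise (fun a c => key c ≤ key a)) :
    (l.foldl (fun acc x => PySem.List.insertBy (fun a c => decide (key c < key a)) x acc) acc).filter p =
      (l.filter p).foldl (fun acc x => PySem.List.insertBy (fun a c => decide (key c < key a)) x acc) (acc.filter p) := by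
  induction l generalizing acc with
  | nil => simp
  | cons x t ih =>
    simp only [List.foldl_cons, List.filter]
    rw [ih _ (pv_insertBy_pairwise key x acc h), pv_filter_insertBy key p x acc h]
    cases hp : p x <;> simp

theorem pv_sorted_rev_filter {α : Type} (key : α → Int) (p : α → Bool) (xs : List α) :
    (PySem.List.sorted xs key true).filter p = PySem.List.sorted (xs.filter p) key true := by
  rw [PySem.List.sorted_rev_eq_foldl_insertBy, PySem.List.sorted_rev_eq_foldl_insertBy]
  simpa using pv_filter_foldl_insertBy key p xs [] (by simp)

theorem pv_insertBy_map {α β : Type} (key : β → Int) (f : α → β) (x : α) (ys : List α) :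
    (PySem.List.insertBy (fun a c => decide (key (f c) < key (f a))) x ys).map f =
      PySem.List.insertBy (fun a c => decide (key c < key a)) (f x) (ys.map f) := by
  induction ys with
  | nil => rfl
  | cons y t ih =>
    by_cases hb : key (f y) < key (f x) <;>
      simp [PySem.List.insertBy, hb, ih]

theorem pv_sorted_rev_map {α β : Type} (key : β → Int) (f : α → β) (l : List α) :
    PySem.List.sorted (l.map f) key true =
      (PySem.List.sorted l (fun a => key (f a)) true).map f := by
  rw [PySem.List.sorted_rev_eq_foldl_insertBy, PySem.List.sorted_rev_eq_foldl_insertBy]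
  rw [List.foldl_map]
  induction l using List.reverseRecOn with
  | nil => rfl
  | append_singleton t x ih =>
    simp only [List.foldl_append, List.foldl_cons, List.foldl_nil, ih]
    rw [pv_insertBy_map]

theorem pv_A_getD (l : List (Int × Int × Int)) (d : PySem.Dict Int (List (Int × Int))) (u : Int) :
    (l.foldl (fun d rating =>
        (if d.contains rating.1 then d else d.insert rating.1 []).modify rating.1 []
          (fun l => l ++ [(rating.2.1, rating.2.2)])) d).getD u [] =
      d.getD u [] ++ (l.filter (fun r => r.1 == u)).map (fun r => (r.2.1, r.2.2)) := by
  induction l generalizing d with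
  | nil => simp
  | cons r t ih =>
    simp only [List.foldl_cons, List.filter_cons]
    rw [ih]
    have hstep : ((if d.contains r.1 then d else d.insert r.1 []).modify r.1 []
        (fun l => l ++ [(r.2.1, r.2.2)])).getD u [] =
        d.getD u [] ++ if r.1 == u then [(r.2.1, r.2.2)] else [] := by
      rw [PySem.Dict.getD_modify]
      by_cases hc : d.contains r.1
      · simp only [hc, if_pos]
        by_cases hu : u = r.1
        · subst hu; simp
        · simp [hu, Ne.symm hu]
      · simp only [hc, if_neg, Bool.false_eq_true, not_false_iff]
        by_cases hu : u = r.1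
        · subst hu
          simp [PySem.Dict.getD_of_not_contains _ _ (by simpa using hc)]
        · simp [hu, Ne.symm hu, PySem.Dict.getD_insert]
    rw [hstep]
    rcases eq_or_ne r.1 u with hu | hu
    · simp [hu]
    · simp [hu]

theorem pv_A_keys (l : List (Int × Int × Int)) (d : PySem.Dict Int (List (Int × Int))) :
    (l.foldl (fun d rating =>
        (if d.contains rating.1 then d else d.insert rating.1 []).modify rating.1 []
          (fun l => l ++ [(rating.2.1, rating.2.2)])) d).keys =
      PySem.Set.update d.keys (l.map (fun r => r.1)) := by
  induction l generalizing d with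
  | nil => simp
  | cons r t ih =>
    simp only [List.foldl_cons, List.map_cons, PySem.Set.update_cons]
    rw [ih]
    congr 1
    rw [PySem.Dict.keys_modify]
    by_cases hc : d.contains r.1
    · simp only [hc, if_pos]
      rw [PySem.Dict.keys_insert_of_contains _ _ hc]
      rw [PySem.Set.add_of_mem ((PySem.Dict.contains_iff_mem_keys _ _).mp hc)]
    · simp only [hc, if_neg, Bool.false_eq_true, not_false_iff]
      rw [PySem.Dict.keys_insert_of_contains _ _ (PySem.Dict.contains_insert_self _ _ _)]
      rw [PySem.Dict.keys_insert_of_not_contains _ _ (by simpa using hc)]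
      rw [PySem.Set.add_of_not_mem (fun hm => hc ((PySem.Dict.contains_iff_mem_keys _ _).mpr hm))]

theorem pv_B0_getD (l : List (Int × Int × Int)) (d : PySem.Dict Int (List Int)) (u : Int) :
    (l.foldl (fun d rating => d.insert rating.1 []) d).getD u [] =
      if u ∈ l.map (fun r => r.1) then [] else d.getD u [] := by
  induction l generalizing d with
  | nil => simp
  | cons r t ih =>
    simp only [List.foldl_cons, List.map_cons, List.mem_cons]
    rw [ih, PySem.Dict.getD_insert]
    by_cases h1 : u ∈ t.map (fun r => r.1) <;> by_cases h2 : u = r.1 <;> simp [h1, h2]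

theorem pv_set_update_of_subset {α : Type} [BEq α] [LawfulBEq α] (xs : List α) (s : PySem.Set α)
    (h : ∀ x ∈ xs, x ∈ s) : PySem.Set.update s xs = s := by
  induction xs generalizing s with
  | nil => simp [PySem.Set.update_nil]
  | cons x t ih =>
    rw [PySem.Set.update_cons, PySem.Set.add_of_mem (h x (by simp))]
    exact ih s (fun y hy => h y (by simp [hy]))

theorem pv_val_eq (ts : List (Int × Int × Int)) (th u : Int) :
    ((PySem.List.sorted ((ts.filter (fun r => r.1 == u)).map (fun r => (r.2.1, r.2.2)))
        (fun x => x.2) true).filter (fun x => decide (th < x.2))).map (fun x => x.1) =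
      (((PySem.List.sorted ts (fun r => r.2.2) true).filter (fun r => decide (th < r.2.2))).filter
        (fun r => r.1 == u)).map (fun r => r.2.1) := by
  rw [pv_sorted_rev_map (fun x : Int × Int => x.2) (fun r : Int × Int × Int => (r.2.1, r.2.2))]
  rw [List.filter_map, List.map_map]
  conv_rhs => rw [List.filter_comm]
  rw [pv_sorted_rev_filter (fun r : Int × Int × Int => r.2.2) (fun r => r.1 == u) ts]
  simp only [Function.comp_def]

theorem reference_sorted_py_spec_aux (test_set : List (Int × Int × Int)) (threshold : Int) :
    reference_sorted_py test_set threshold = reference_sorted_py_alt test_set threshold := by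
  unfold reference_sorted_py reference_sorted_py_alt
  dsimp only
  -- A side
  have hkA : (test_set.foldl (fun d rating =>
      (if d.contains rating.1 then d else d.insert rating.1 []).modify rating.1 []
        (fun l => l ++ [(rating.2.1, rating.2.2)]))
        (PySem.Dict.empty : PySem.Dict Int (List (Int × Int)))).keys
      = PySem.Set.ofList (test_set.map (fun r => r.1)) := by
    rw [pv_A_keys]
    simp [PySem.Set.update_nil_left]
  have hndA := hkA ▸ PySem.Set.nodup_ofList (test_set.map (fun r : Int × Int × Int => r.1))
  -- B side: registration dict
  have hkB0 : (test_set.foldl (fun d rating => d.insert rating.1 ([] : List Int))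
      PySem.Dict.empty).keys = PySem.Set.ofList (test_set.map (fun r => r.1)) := by
    rw [PySem.Dict.keys_foldl_insert_key test_set (fun r => r.1) (fun _ _ => [])]
    simp [PySem.Set.update_nil_left]
  -- B side: second fold as a filtered modify-fold
  rw [PySem.List.foldl_ite_eq_foldl_filter (fun r : Int × Int × Int => threshold < r.2.2)
      (fun (d : PySem.Dict Int (List Int)) (r : Int × Int × Int) =>
        d.modify r.1 [] (fun l => l ++ [r.2.1]))]
  have hmap : ∀ (l : List (Int × Int × Int)) (d : PySem.Dict Int (List Int)),
      l.foldl (fun d r => d.modify r.1 [] (fun l => l ++ [r.2.1])) d =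
      (l.map (fun r : Int × Int × Int => (r.1, r.2.1))).foldl (fun d p => d.modify p.1 [] (fun l => l ++ [p.2])) d := by
    intro l d; rw [List.foldl_map]
  rw [hmap]
  set g := (PySem.List.sorted test_set (fun r => r.2.2) true).filter
      (fun r => decide (threshold < r.2.2)) with hg
  have hsub : ∀ x ∈ g.map (fun r => r.1), x ∈ (test_set.foldl
      (fun d rating => d.insert rating.1 ([] : List Int)) PySem.Dict.empty).keys := by
    intro x hx
    rw [hkB0, PySem.Set.mem_ofList]
    rcases List.mem_map.mp hx with ⟨r, hr, rfl⟩
    have : r ∈ test_set := (PySem.List.mem_sorted _ _ _ _).mp (List.mem_of_mem_filter hr)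
    exact List.mem_map.mpr ⟨r, this, rfl⟩
  have hkB : ((g.map (fun r => (r.1, r.2.1))).foldl
      (fun d p => d.modify p.1 [] (fun l => l ++ [p.2]))
      (test_set.foldl (fun d rating => d.insert rating.1 ([] : List Int)) PySem.Dict.empty)).keys
      = PySem.Set.ofList (test_set.map (fun r => r.1)) := by
    rw [PySem.Dict.keys_foldl_modify_key]
    rw [show (g.map (fun r => (r.1, r.2.1))).map (fun p => p.1) = g.map (fun r => r.1) by
      simp [Function.comp_def]]
    rw [pv_set_update_of_subset _ _ hsub, hkB0]
  have hndB := hkB ▸ PySem.Set.nodup_ofList (test_set.map (fun r : Int × Int × Int => r.1))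
  rw [PySem.Dict.items_eq_map_keys _ hndA [], PySem.Dict.items_eq_map_keys _ hndB []]
  rw [hkA, hkB]
  rw [List.map_map]
  apply List.map_congr_left
  intro u hu
  have humem : u ∈ test_set.map (fun r => r.1) := by rwa [PySem.Set.mem_ofList] at hu
  simp only [Function.comp_def]
  refine congrArg (fun v => (u, v)) ?_
  rw [pv_A_getD]
  rw [PySem.Dict.getD_foldl_modify_append]
  rw [pv_B0_getD]
  simp only [humem, if_pos, PySem.Dict.getD_empty, List.nil_append]
  rw [List.filter_map, List.map_map]
  simp only [Function.comp_def]
  rw [hg]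
  exact pv_val_eq test_set threshold u

-- ===== VERDICT (by name: the statement is the Claim_ definition above) =====
theorem reference_sorted_py_spec : Claim_equal_reference_sorted_py := by
  intro test_set threshold _
  exact reference_sorted_py_spec_aux test_set threshold
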